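-- pv_equiv track=rewrite | github.com/samucarpi/Tirocinio | analyst/analyst.py | countReactions
-- ===== SOURCE A (Python) =====
-- def countReactions(lines):
--     count = 0
--     trigger=False
--     flag=False
--     for i,line in enumerate(lines):
--         if not trigger:
--             if line.startswith("10.0"):
--                 trigger=True
--         else:
--             if not flag:
--                 if not line.startswith("10.0"):
--                     flag = True
--                     if "NESSUNA REAZIONE GENERATA" in line:
--                         continue
--                     else:
--                         count += 1
--             else:
--                 count += 1
--     return count
-- ===== SOURCE B (Python) =====
-- def countReactions(lines):
--     # Edge detection: the reaction block begins at the first "falling edge"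
--     # where a line starting with "10.0" is immediately followed by one that
--     # does not; the answer is the length of what follows that edge, minus one
--     # if the edge line carries the no-reaction sentinel.
--     rest = lines[1:]
--     for j, (prev, cur) in enumerate(zip(lines, rest)):
--         if prev.startswith("10.0") and not cur.startswith("10.0"):
--             return len(rest) - j - ("NESSUNA REAZIONE GENERATA" in cur)
--     return 0
-- ===== Notes on version B (the rewrite author's own statement) =====
-- stated objective: alternative
-- what changed: Replaces A's two-flag counting state machine with adjacent-pair edge detection: scan zip(lines, lines[1:]) for the first '10.0'->non-'10.0' falling edge and return the remaining length by arithmetic (minus one if the edge line contains the sentinel), with no counter and no flags.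
import Mathlib
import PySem

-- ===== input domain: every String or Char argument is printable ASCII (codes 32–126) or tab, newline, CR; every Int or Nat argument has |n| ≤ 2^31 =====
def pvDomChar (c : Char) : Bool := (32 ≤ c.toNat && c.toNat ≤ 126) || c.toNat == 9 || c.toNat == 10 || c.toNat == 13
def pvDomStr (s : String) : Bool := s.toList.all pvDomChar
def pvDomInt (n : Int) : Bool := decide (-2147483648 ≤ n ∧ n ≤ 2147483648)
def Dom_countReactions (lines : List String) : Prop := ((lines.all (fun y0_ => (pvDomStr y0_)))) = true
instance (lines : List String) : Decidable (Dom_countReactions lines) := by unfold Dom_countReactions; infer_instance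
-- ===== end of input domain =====

-- B replaces A's two-flag counting state machine with adjacent-pair edge detection
-- (find the first '10.0'->non-'10.0' falling edge, answer by length arithmetic): alternative algorithm, same cost.
-- ===== PORT A =====
def stepA (st : Int × Bool × Bool) (line : String) : Int × Bool × Bool :=
  match st with
  | (count, trigger, flag) =>
    if !trigger then
      if PySem.Str.startswith line "10.0" then (count, true, flag) else (count, trigger, flag)
    else
      if !flag then
        if !(PySem.Str.startswith line "10.0") then
          if PySem.Str.isIn "NESSUNA REAZIONE GENERATA" line then (count, trigger, true)
          else (count + 1, trigger, true)
        else (count, trigger, flag)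
      else (count + 1, trigger, flag)

def countReactions (lines : List String) : Int :=
  (lines.foldl stepA (0, false, false)).1

-- ===== PORT B =====
-- the loop over zip(lines, lines[1:]): each step looks at one adjacent pair (prev, cur);
-- on the first falling edge it returns len(rest) - j, i.e. the length of cur :: following,
-- minus the sentinel indicator; exhausting the pairs returns 0.
def edgeScan : List String → Int
  | prev :: cur :: rest =>
      if PySem.Str.startswith prev "10.0" && !(PySem.Str.startswith cur "10.0") then
        ((cur :: rest).length : Int) -
          (if PySem.Str.isIn "NESSUNA REAZIONE GENERATA" cur then 1 else 0)
      else edgeScan (cur :: rest)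
  | _ => 0

def countReactions_alt (lines : List String) : Int := edgeScan lines

-- ===== PRECONDITION & SPEC =====
def Spec_countReactions (lines : List String) (out : Int) : Prop := out = countReactions_alt lines
instance (lines : List String) (out : Int) : Decidable (Spec_countReactions lines out) := by unfold Spec_countReactions; infer_instance

-- ===== CLAIM (what is proved, stated in full; the proofs are below) =====
def Claim_equal_countReactions : Prop := ∀ (lines : List String), Dom_countReactions lines → Spec_countReactions lines (countReactions lines)

-- ===== LEMMAS AND PROOFS =====

-- from state (c, true, true) the fold just counts every remaining line
theorem foldA_tt (lines : List String) (c : Int) :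
    (lines.foldl stepA (c, true, true)).1 = c + lines.length := by
  induction lines generalizing c with
  | nil => simp
  | cons l ls ih => simp [stepA, ih]; ring

-- after the trigger line l, A's fold from (c, true, false) computes c + B's edge scan on l :: ls
theorem foldA_tf (l : String) (ls : List String) (c : Int)
    (hl : PySem.Str.startswith l "10.0" = true) :
    (ls.foldl stepA (c, true, false)).1 = c + edgeScan (l :: ls) := by
  induction ls generalizing c l with
  | nil => simp [edgeScan]
  | cons l2 rest ih =>
    simp [PySem.Str.startswith_eq] at hl
    by_cases hs : PySem.Chars.startswith l2.toList ['1', '0', '.', '0'] = true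
    · have he : edgeScan (l :: l2 :: rest) = edgeScan (l2 :: rest) := by
        simp [edgeScan, PySem.Str.startswith_eq, hs]
      rw [he]
      have := ih l2 c (by simp [PySem.Str.startswith_eq, hs])
      simpa [List.foldl, stepA, PySem.Str.startswith_eq, hs] using this
    · by_cases hn : PySem.Str.isIn "NESSUNA REAZIONE GENERATA" l2
      all_goals simp [PySem.Str.isIn_eq] at hn
      all_goals
        simp [List.foldl, stepA, PySem.Str.startswith_eq, PySem.Str.isIn_eq,
          hs, hn, hl, edgeScan, foldA_tt] <;> ring

-- from the initial state the fold computes B's value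
theorem foldA_ff (lines : List String) (c : Int) :
    (lines.foldl stepA (c, false, false)).1 = c + edgeScan lines := by
  induction lines generalizing c with
  | nil => simp [edgeScan]
  | cons l ls ih =>
    by_cases hs : PySem.Str.startswith l "10.0"
    · simp only [List.foldl, stepA, hs]
      simp [foldA_tf l ls c hs]
    · cases ls with
      | nil => simp [List.foldl, stepA, PySem.Str.startswith_eq] at hs ⊢; simp [hs, edgeScan]
      | cons l2 rest =>
        simp only [List.foldl, stepA, hs]
        simp only [edgeScan, hs]
        simpa using ih c

-- ===== VERDICT (by name: the statement is the Claim_ definition above) =====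
theorem countReactions_spec : Claim_equal_countReactions := by
  intro lines _
  unfold Spec_countReactions countReactions countReactions_alt
  simpa using foldA_ff lines 0
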